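-- pv_equiv track=rewrite | github.com/ZeroSum24/Automated_Financial_Calculator | src/utils/misc_methods.py | dict_equals
-- ===== SOURCE A (Python) =====
-- def dict_equals(d1, d2):
--     """
--     Commparing if two dictionaries are equal
--
--     :param d1:
--     :param d2:
--     :return:
--     """
--
--     dict_equal = False
--
--     # converting the dictionary keys to a set
--     d1_keys = set(d1.keys())
--     d2_keys = set(d2.keys())
--
--     # building a set of keys for which all the values match
--     intersect_keys = d1_keys.intersection(d2_keys)
--     same_values = set(o for o in intersect_keys if d1[o] == d2[o])
--
--     if len(same_values) == len(d1_keys) and len(same_values) == len(d2_keys):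
--         dict_equal = True
--
--     return dict_equal
-- ===== SOURCE B (Python) =====
-- def dict_equals(d1, d2):
--     """Single pass with early exit instead of building key sets and set comparisons."""
--     if len(d1) != len(d2):
--         return False
--     for k, v in d1.items():
--         if k not in d2:
--             return False
--         if d2[k] != v:
--             return False
--     return True
-- ===== Notes on version B (the rewrite author's own statement) =====
-- stated objective: simpler
-- what changed: Replaces A's construction of two key sets, their intersection and a filtered matching-value set compared by cardinality with a length check plus a single early-exit pass over d1 comparing each value against d2; avoiding the intermediate set objects also makes it measurably faster by a constant factor.
import Mathlib
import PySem

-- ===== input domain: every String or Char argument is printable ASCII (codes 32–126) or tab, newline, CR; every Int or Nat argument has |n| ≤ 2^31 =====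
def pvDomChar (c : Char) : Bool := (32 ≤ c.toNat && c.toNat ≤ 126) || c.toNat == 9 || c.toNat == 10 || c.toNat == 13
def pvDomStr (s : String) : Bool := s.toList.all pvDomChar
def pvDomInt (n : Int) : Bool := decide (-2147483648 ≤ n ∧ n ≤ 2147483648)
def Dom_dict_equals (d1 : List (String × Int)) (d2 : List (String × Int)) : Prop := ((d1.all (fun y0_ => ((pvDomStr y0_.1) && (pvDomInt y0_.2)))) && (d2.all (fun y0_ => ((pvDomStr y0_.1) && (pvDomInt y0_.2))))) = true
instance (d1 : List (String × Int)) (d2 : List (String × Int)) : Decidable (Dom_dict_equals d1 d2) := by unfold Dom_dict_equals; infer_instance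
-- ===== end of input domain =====

-- B replaces A's key-set/intersection/cardinality comparison with a length check plus a single
-- early-exit pass over d1 (simpler decomposition; same asymptotic cost).


-- ===== PORT A =====
def dict_equals (d1 : List (String × Int)) (d2 : List (String × Int)) : Bool :=
  let dictEqual : Bool := false
  -- converting the dictionary keys to a set
  let d1Keys : PySem.Set String := PySem.Set.ofList (PySem.Dict.keys (PySem.Dict.mk d1))
  let d2Keys : PySem.Set String := PySem.Set.ofList (PySem.Dict.keys (PySem.Dict.mk d2))
  -- building a set of keys for which all the values match
  let intersectKeys : PySem.Set String := PySem.Set.inter d1Keys d2Keys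
  -- d1[o] / d2[o] always succeed here (o is in both key sets), so compared as get? options
  let sameValues : PySem.Set String := PySem.Set.ofList (intersectKeys.filter
      (fun o => (PySem.Dict.mk d1).get? o == (PySem.Dict.mk d2).get? o))
  if sameValues.length == d1Keys.length && sameValues.length == d2Keys.length then true
  else dictEqual

-- ===== PORT B =====
-- the 'for k, v in d1.items(): …' early-exit loop of Source B
def dictEqualsLoop (d2 : PySem.Dict String Int) : List (String × Int) → Bool
  | [] => true
  | (k, v) :: rest =>
    match d2.get? k with          -- 'k not in d2' → none; 'd2[k]' → the value
    | none => false
    | some w => if w ≠ v then false else dictEqualsLoop d2 rest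

def dict_equals_alt (d1 : List (String × Int)) (d2 : List (String × Int)) : Bool :=
  if d1.length ≠ d2.length then false
  else dictEqualsLoop (PySem.Dict.mk d2) d1

-- ===== PRECONDITION & SPEC =====
-- Pre_ requires the association lists to have pairwise-distinct keys: the Python arguments are
-- dicts, which cannot carry duplicate keys, so a list with duplicates represents no valid input.
def Pre_dict_equals (d1 : List (String × Int)) (d2 : List (String × Int)) : Prop :=
  (d1.map Prod.fst).Nodup ∧ (d2.map Prod.fst).Nodup
instance (d1 : List (String × Int)) (d2 : List (String × Int)) : Decidable (Pre_dict_equals d1 d2) := by unfold Pre_dict_equals; infer_instance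

def pvWitness_dict_equals : (List (String × Int)) × (List (String × Int)) :=
  ([("a", 1), ("b", 2)], [("b", 2), ("a", 1)])

def Spec_dict_equals (d1 : List (String × Int)) (d2 : List (String × Int)) (out : Bool) : Prop := out = dict_equals_alt d1 d2
instance (d1 : List (String × Int)) (d2 : List (String × Int)) (out : Bool) : Decidable (Spec_dict_equals d1 d2 out) := by unfold Spec_dict_equals; infer_instance

-- ===== CLAIM (what is proved, stated in full; the proofs are below) =====
def Claim_equal_dict_equals : Prop := ∀ (d1 : List (String × Int)) (d2 : List (String × Int)), Dom_dict_equals d1 d2 → Pre_dict_equals d1 d2 → Spec_dict_equals d1 d2 (dict_equals d1 d2)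

-- ===== LEMMAS AND PROOFS =====

-- B's loop succeeds iff every pair of d1 is reproduced by lookup in d2
theorem dictEqualsLoop_iff (D : PySem.Dict String Int) (l : List (String × Int)) :
    dictEqualsLoop D l = true ↔ ∀ p ∈ l, D.get? p.1 = some p.2 := by
  induction l with
  | nil => simp [dictEqualsLoop]
  | cons p rest ih =>
    obtain ⟨k, v⟩ := p
    simp only [dictEqualsLoop, List.mem_cons]
    cases h : D.get? k with
    | none => simp [h]
    | some w =>
      dsimp only
      by_cases hw : w = v
      · subst hw
        rw [if_neg (by simp), ih]
        constructor
        · intro hall q hq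
          rcases hq with rfl | hq
          · exact h
          · exact hall q hq
        · intro hall q hq
          exact hall q (Or.inr hq)
      · rw [if_pos hw]
        constructor
        · intro hfalse; cases hfalse
        · intro hall
          have h2 := hall (k, v) (Or.inl rfl)
          rw [h] at h2
          exact absurd (Option.some.inj h2) hw

theorem dict_equals_spec_aux (d1 d2 : List (String × Int))
    (h1 : (d1.map Prod.fst).Nodup) (h2 : (d2.map Prod.fst).Nodup) :
    dict_equals d1 d2 = dict_equals_alt d1 d2 := by
  apply Bool.coe_iff_coe.mp
  -- names for the two key lists
  set K1 := d1.map Prod.fst with hK1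
  set K2 := d2.map Prod.fst with hK2
  have hkeys1 : (PySem.Dict.mk d1).keys = K1 := PySem.Dict.keys_mk d1
  have hkeys2 : (PySem.Dict.mk d2).keys = K2 := PySem.Dict.keys_mk d2
  -- unfold port A to a filter-length condition
  have hA : dict_equals d1 d2 = true ↔
      ((K1.filter (fun o => ((PySem.Dict.mk d1).get? o == (PySem.Dict.mk d2).get? o)
          && K2.contains o)).length = K1.length ∧
       (K1.filter (fun o => ((PySem.Dict.mk d1).get? o == (PySem.Dict.mk d2).get? o)
          && K2.contains o)).length = K2.length) := by
    simp only [dict_equals, hkeys1, hkeys2,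
      PySem.Set.ofList_eq_self_of_nodup K1 h1, PySem.Set.ofList_eq_self_of_nodup K2 h2,
      PySem.Set.inter, PySem.Set.contains, List.filter_filter,
      PySem.Set.ofList_eq_self_of_nodup _ (h1.filter _)]
    simp
  have hB : dict_equals_alt d1 d2 = true ↔
      (d1.length = d2.length ∧ ∀ p ∈ d1, (PySem.Dict.mk d2).get? p.1 = some p.2) := by
    simp only [dict_equals_alt, ne_eq, ite_not]
    by_cases hlen : d1.length = d2.length
    · simp [hlen, dictEqualsLoop_iff]
    · simp [hlen]
  rw [hA, hB]
  have hfst : ∀ p ∈ d1, (PySem.Dict.mk d1).get? p.1 = some p.2 := by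
    intro p hp
    exact PySem.Dict.get?_of_mem_items (PySem.Dict.mk d1) hp (hkeys1 ▸ h1)
  constructor
  · rintro ⟨hlK1, hlK2⟩
    have hall := (List.length_filter_eq_length_iff).mp hlK1
    refine ⟨?_, ?_⟩
    · -- lengths: the filter equals K1, whose length also equals K2.length
      have : K1.length = K2.length := by omega
      simpa [hK1, hK2] using this
    · intro p hp
      obtain ⟨k, v⟩ := p
      have hk1 : k ∈ K1 := by
        rw [hK1]; exact List.mem_map.mpr ⟨(k, v), hp, rfl⟩
      have h := hall k hk1
      have hq := (Bool.and_eq_true _ _).mp h |>.1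
      have hv1 : (PySem.Dict.mk d1).get? k = some v := hfst (k, v) hp
      have : (PySem.Dict.mk d1).get? k = (PySem.Dict.mk d2).get? k := by
        simpa using hq
      rw [← this, hv1]
  · rintro ⟨hlen, hall⟩
    have hself : ∀ o ∈ K1, (((PySem.Dict.mk d1).get? o == (PySem.Dict.mk d2).get? o)
        && K2.contains o) = true := by
      intro o ho
      obtain ⟨⟨k, v⟩, hp, rfl⟩ := List.mem_map.mp (hK1 ▸ ho)
      have hv1 := hfst (k, v) hp
      have hv2 := hall (k, v) hp
      have hmem : (k, v).1 ∈ K2 := by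
        by_contra hnot
        have := (PySem.Dict.get?_eq_none_iff_not_mem_keys (PySem.Dict.mk d2) (k, v).1).mpr
          (by rwa [hkeys2])
        rw [hv2] at this; cases this
      simp [hv1, hv2, hmem]
    rw [List.filter_eq_self.mpr hself]
    constructor
    · rfl
    · simpa [hK1, hK2] using hlen

-- ===== VERDICT (by name: the statement is the Claim_ definition above) =====
theorem dict_equals_spec : Claim_equal_dict_equals := by
  intro d1 d2 _ hpre
  exact dict_equals_spec_aux d1 d2 hpre.1 hpre.2
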